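-- pv_equiv track=rewrite | github.com/valentinogirini/ayed1-2025-tps | TP4/ejercicio11.py | contar_subcadena
-- ===== SOURCE A (Python) =====
-- def contar_subcadena(cadena: str, subcadena: str) -> int:
--     """
--     Cuenta cuántas veces se encuentra la subcadena dentro de la cadena,
--     sin diferenciar mayúsculas y minúsculas. Los caracteres de la subcadena
--     no necesariamente deben ser consecutivos pero sí respetar el orden.
--
--     Precondición: cadena y subcadena son cadenas no vacías.
--
--     Postcondición: retorna un entero con la cantidad de veces que se puede formar la subcadena
--     dentro de la cadena, en orden.
--     """
--     cadena = cadena.lower()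
--     subcadena = subcadena.lower()
--     cantidad_encontradas = 0
--     posicion_cadena = 0
--
--     while posicion_cadena < len(cadena):
--         posicion_subcadena = 0
--         encontro_coincidencia = False
--
--         for indice in range(posicion_cadena, len(cadena)):
--             if cadena[indice] == subcadena[posicion_subcadena]:
--                 posicion_subcadena += 1
--                 if posicion_subcadena == len(subcadena):
--                     cantidad_encontradas += 1
--                     posicion_cadena = indice + 1
--                     encontro_coincidencia = True
--                     break
--
--         if not encontro_coincidencia:
--             break
--
--     return cantidad_encontradas
-- ===== SOURCE B (Python) =====
-- def contar_subcadena(cadena: str, subcadena: str) -> int: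
--     sub = subcadena.lower()
--     cantidad = 0
--     j = 0
--     for ch in cadena.lower():
--         if ch == sub[j]:
--             j += 1
--             if j == len(sub):
--                 cantidad += 1
--                 j = 0
--     return cantidad
-- ===== Notes on version B (the rewrite author's own statement) =====
-- stated objective: simpler
-- what changed: Replaced A's restarting while-loop with nested index scan (re-scanning from the match position each round) by one flat for-loop over the characters keeping a single running index into subcadena that resets after each complete match.
import Mathlib
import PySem

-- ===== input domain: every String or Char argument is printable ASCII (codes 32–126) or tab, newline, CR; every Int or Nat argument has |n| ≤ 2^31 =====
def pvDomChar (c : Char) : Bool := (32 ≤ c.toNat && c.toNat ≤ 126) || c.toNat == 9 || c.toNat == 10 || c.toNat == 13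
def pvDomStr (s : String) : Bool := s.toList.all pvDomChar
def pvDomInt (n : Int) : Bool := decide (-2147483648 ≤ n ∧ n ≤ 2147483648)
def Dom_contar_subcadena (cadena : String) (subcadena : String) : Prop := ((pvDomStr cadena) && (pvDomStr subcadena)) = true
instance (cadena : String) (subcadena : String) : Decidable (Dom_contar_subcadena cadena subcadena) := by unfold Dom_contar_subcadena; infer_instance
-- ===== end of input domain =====

-- B replaces A's restart-from-match-position outer/inner loop pair by one flat pass with a
-- single running index into subcadena; same values, objective: simpler.

-- ===== PORT A =====
-- inner 'for indice in range(posicion_cadena, len(cadena))' loop: returns the index where a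
-- full match of sl completed (the break), or none if the loop ran out.  The Nat `fuel`
-- argument only makes the recursion structural (callers pass fuel ≥ cl.length - indice).
def pvAInner (cl sl : List Char) : Nat → Nat → Nat → Option Nat
  | 0, _, _ => none
  | fuel + 1, indice, j =>
    if h : indice < cl.length then
      if cl[indice] = sl.getD j ' ' then   -- sl[j]: under Pre_, j < sl.length always holds here
        if j + 1 = sl.length then some indice
        else pvAInner cl sl fuel (indice + 1) (j + 1)
      else pvAInner cl sl fuel (indice + 1) j
    else none

-- outer 'while posicion_cadena < len(cadena)' loop (counting via 1 + recursion); fuel is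
-- again only a structural bound (each round advances posicion_cadena by at least one).
def pvAOuter (cl sl : List Char) : Nat → Nat → Int
  | 0, _ => 0
  | fuel + 1, pos =>
    match pvAInner cl sl cl.length pos 0 with
    | some indice => 1 + pvAOuter cl sl fuel (indice + 1)
    | none => 0

def contar_subcadena (cadena : String) (subcadena : String) : Int :=
  let cl := PySem.Chars.lower cadena.toList
  pvAOuter cl (PySem.Chars.lower subcadena.toList) (cl.length + 1) 0

-- ===== PORT B =====
-- flat loop state: (j, cantidad)
def pvBStep (sl : List Char) (st : Nat × Int) (ch : Char) : Nat × Int :=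
  if ch = sl.getD st.1 ' ' then          -- sl[j]: under Pre_, st.1 < sl.length always holds
    if st.1 + 1 = sl.length then (0, st.2 + 1) else (st.1 + 1, st.2)
  else st

def contar_subcadena_alt (cadena : String) (subcadena : String) : Int :=
  let sl := PySem.Chars.lower subcadena.toList
  ((PySem.Chars.lower cadena.toList).foldl (pvBStep sl) (0, 0)).2

-- ===== PRECONDITION & SPEC =====
-- Pre_ excludes only empty subcadena with non-empty cadena: there A raises IndexError
-- (subcadena[0]); B raises the same IndexError.
def Pre_contar_subcadena (cadena : String) (subcadena : String) : Prop :=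
  cadena = "" ∨ subcadena ≠ ""
instance (cadena : String) (subcadena : String) : Decidable (Pre_contar_subcadena cadena subcadena) := by
  unfold Pre_contar_subcadena; infer_instance

def pvWitness_contar_subcadena : String × String := ("abracadabra", "AbA")

def Spec_contar_subcadena (cadena : String) (subcadena : String) (out : Int) : Prop := out = contar_subcadena_alt cadena subcadena
instance (cadena : String) (subcadena : String) (out : Int) : Decidable (Spec_contar_subcadena cadena subcadena out) := by unfold Spec_contar_subcadena; infer_instance

-- ===== CLAIM (what is proved, stated in full; the proofs are below) =====
def Claim_equal_contar_subcadena : Prop := ∀ (cadena : String) (subcadena : String), Dom_contar_subcadena cadena subcadena → Pre_contar_subcadena cadena subcadena → Spec_contar_subcadena cadena subcadena (contar_subcadena cadena subcadena)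

-- ===== LEMMAS AND PROOFS =====

-- a successful inner scan starts no earlier than `indice`
theorem pvAInner_some_le (cl sl : List Char) : ∀ (fuel indice j i : Nat),
    pvAInner cl sl fuel indice j = some i → indice ≤ i := by
  intro fuel
  induction fuel with
  | zero => intro indice j i h; simp [pvAInner] at h
  | succ n ih =>
    intro indice j i h
    rw [pvAInner] at h
    by_cases hlt : indice < cl.length
    · rw [dif_pos hlt] at h
      split_ifs at h with h1 h2
      · simp at h; omega
      · have := ih (indice + 1) (j + 1) i h; omega
      · have := ih (indice + 1) j i h; omega
    · rw [dif_neg hlt] at h; simp at h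

-- One inner-loop round of A, seen through B's fold: folding B's step over the suffix from
-- `indice` with state (j, cnt) yields count cnt+1 continued after the match index, or cnt.
theorem pvFold_inner (cl sl : List Char) : ∀ (fuel indice j : Nat) (cnt : Int),
    cl.length - indice ≤ fuel → j < sl.length →
    ((cl.drop indice).foldl (pvBStep sl) (j, cnt)).2 =
      (match pvAInner cl sl fuel indice j with
       | some i => ((cl.drop (i + 1)).foldl (pvBStep sl) (0, cnt + 1)).2
       | none => cnt) := by
  intro fuel
  induction fuel with
  | zero =>
    intro indice j cnt hn hj
    rw [List.drop_eq_nil_of_le (by omega)]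
    simp [pvAInner]
  | succ n ih =>
    intro indice j cnt hn hj
    rw [pvAInner]
    by_cases hlt : indice < cl.length
    · rw [dif_pos hlt, List.drop_eq_getElem_cons hlt, List.foldl_cons]
      by_cases heq : (cl[indice]'hlt) = sl.getD j ' '
      · rw [if_pos heq]
        by_cases hend : j + 1 = sl.length
        · rw [if_pos hend]
          have hstep : pvBStep sl (j, cnt) (cl[indice]'hlt) = (0, cnt + 1) := by
            simp only [pvBStep]; rw [if_pos heq, if_pos hend]
          rw [hstep]
        · rw [if_neg hend]
          have hstep : pvBStep sl (j, cnt) (cl[indice]'hlt) = (j + 1, cnt) := by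
            simp only [pvBStep]; rw [if_pos heq, if_neg hend]
          rw [hstep]
          exact ih (indice + 1) (j + 1) cnt (by omega) (by omega)
      · rw [if_neg heq]
        have hstep : pvBStep sl (j, cnt) (cl[indice]'hlt) = (j, cnt) := by
          simp only [pvBStep]; rw [if_neg heq]
        rw [hstep]
        exact ih (indice + 1) j cnt (by omega) hj
    · rw [dif_neg hlt, List.drop_eq_nil_of_le (by omega)]
      simp

-- A's whole outer loop equals B's fold over the remaining suffix.
theorem pvFold_outer (cl sl : List Char) (hs : sl ≠ []) : ∀ (fuel pos : Nat) (cnt : Int),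
    cl.length ≤ fuel + pos →
    ((cl.drop pos).foldl (pvBStep sl) (0, cnt)).2 = cnt + pvAOuter cl sl fuel pos := by
  intro fuel
  induction fuel with
  | zero =>
    intro pos cnt hf
    rw [List.drop_eq_nil_of_le (by omega)]
    simp [pvAOuter]
  | succ n ih =>
    intro pos cnt hf
    rw [pvAOuter]
    rw [pvFold_inner cl sl cl.length pos 0 cnt (by omega) (List.length_pos_of_ne_nil hs)]
    cases hm : pvAInner cl sl cl.length pos 0 with
    | some indice =>
      have hle := pvAInner_some_le cl sl cl.length pos 0 indice hm
      show (List.foldl (pvBStep sl) (0, cnt + 1) (List.drop (indice + 1) cl)).2 =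
        cnt + (1 + pvAOuter cl sl n (indice + 1))
      rw [ih (indice + 1) (cnt + 1) (by omega)]
      ring
    | none => simp

-- ===== VERDICT (by name: the statement is the Claim_ definition above) =====
theorem contar_subcadena_spec : Claim_equal_contar_subcadena := by
  intro cadena subcadena _ hpre
  unfold Spec_contar_subcadena contar_subcadena contar_subcadena_alt
  rcases hpre with hc | hs
  · subst hc; rfl
  · have hs' : PySem.Chars.lower subcadena.toList ≠ [] := by
      intro h
      apply hs
      have hlen : subcadena.toList = [] := by
        have := congrArg List.length h
        simpa [PySem.Chars.lower] using this
      exact String.toList_injective (by simp [hlen])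
    have h := pvFold_outer (PySem.Chars.lower cadena.toList)
      (PySem.Chars.lower subcadena.toList) hs'
      ((PySem.Chars.lower cadena.toList).length + 1) 0 0 (by omega)
    simp only [List.drop_zero] at h
    rw [h]; ring
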